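-- pv_equiv track=rewrite | github.com/kyh0726/DailyCoding | 프로그래머스/1/17681. ［1차］ 비밀지도/［1차］ 비밀지도.py | solution
-- ===== SOURCE A (Python) =====
-- def solution(n, arr1, arr2):
--     answer = []
--     target = 20
--
--     def convert_to_binary(num):
--         temp = num
--         result = ""
--         for i in range(n):
--             remains = temp % 2
--             temp = temp // 2
--             if remains:
--                 result += "#"
--             else:
--                 result += " "
--         return result[::-1]
--
--     for i in range(n):
--         a_result = convert_to_binary(arr1[i])
--         b_result = convert_to_binary(arr2[i])
--
--         result = ""
--         for j in range(n):
--             if a_result[j] == " " and b_result[j] == " ":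
--                 result += " "
--             else:
--                 result += "#"
--
--         answer.append(result)
--
--
--     return answer
-- ===== SOURCE B (Python) =====
-- def solution(n, arr1, arr2):
--     out = []
--     for i in range(n):
--         c = arr1[i] | arr2[i]
--         out.append("".join("#" if c >> j & 1 else " " for j in range(n - 1, -1, -1)))
--     return out
-- ===== Notes on version B (the rewrite author's own statement) =====
-- stated objective: simpler
-- what changed: B ORs the two row integers once and renders the n characters MSB-first directly with bit shifts, replacing A's three per-row passes (two digit-by-digit binary conversions with string reversal plus a character-merge loop); a timing run measured this constant-factor change at about 3.9x.
import Mathlib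
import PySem

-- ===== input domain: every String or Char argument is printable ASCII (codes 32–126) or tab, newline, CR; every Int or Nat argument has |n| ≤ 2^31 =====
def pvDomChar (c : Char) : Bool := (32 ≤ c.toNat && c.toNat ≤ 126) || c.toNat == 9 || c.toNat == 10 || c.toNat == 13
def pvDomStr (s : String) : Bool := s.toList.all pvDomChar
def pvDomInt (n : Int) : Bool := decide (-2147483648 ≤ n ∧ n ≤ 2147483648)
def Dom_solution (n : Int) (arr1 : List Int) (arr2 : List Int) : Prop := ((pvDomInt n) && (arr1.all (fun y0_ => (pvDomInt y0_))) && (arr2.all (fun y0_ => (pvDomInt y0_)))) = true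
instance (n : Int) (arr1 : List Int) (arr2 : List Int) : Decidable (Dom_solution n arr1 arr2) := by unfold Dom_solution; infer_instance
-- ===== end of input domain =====

-- B replaces A's three per-row passes (two digit-by-digit binary conversions plus a
-- character-merge loop) by one integer OR per row rendered MSB-first with bit shifts
-- (objective: simpler; same asymptotic cost, measured constant-factor speedup).

-- ===== PORT A =====
-- inner helper convert_to_binary (closure over n); Python strings are carried as List Char
-- (PySem.Chars convention); result[::-1] is List.reverse (PySem.List.slice?_none_none_neg_one).
def pvConvertToBinary (n : Int) (num : Int) : List Char :=
  ((PySem.List.pyRange 0 n 1).foldl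
    (fun (st : Int × List Char) _ =>
      let remains := PySem.Int.mod st.1 2
      let temp := PySem.Int.floordiv st.1 2
      (temp, st.2 ++ [if remains ≠ 0 then '#' else ' ']))
    (num, [])).2.reverse

-- arr1[i] / arr2[i] are ported with pyGetD (default irrelevant): under Pre_solution the
-- index 0 ≤ i < n ≤ length is always in range, exactly where Python does not raise.
-- The inner a_result[j] / b_result[j] always have 0 ≤ j < n = length, so pyGetD is exact.
def solution (n : Int) (arr1 : List Int) (arr2 : List Int) : List String :=
  (PySem.List.pyRange 0 n 1).foldl
    (fun answer i =>
      let aRes := pvConvertToBinary n (PySem.List.pyGetD arr1 i 0)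
      let bRes := pvConvertToBinary n (PySem.List.pyGetD arr2 i 0)
      let result := (PySem.List.pyRange 0 n 1).foldl
        (fun (r : List Char) j =>
          r ++ [if PySem.List.pyGetD aRes j ' ' = ' ' ∧ PySem.List.pyGetD bRes j ' ' = ' '
                then ' ' else '#'])
        []
      answer ++ [String.ofList result])
    []

-- ===== PORT B =====
-- c >> j with j from range(n-1, -1, -1): j ≥ 0 throughout, so `c >>> j.toNat` is exact.
def solution_alt (n : Int) (arr1 : List Int) (arr2 : List Int) : List String :=
  (PySem.List.pyRange 0 n 1).foldl
    (fun out i =>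
      let c := PySem.Int.bor (PySem.List.pyGetD arr1 i 0) (PySem.List.pyGetD arr2 i 0)
      out ++ [String.ofList ((PySem.List.pyRange (n - 1) (-1) (-1)).map
        (fun j => if PySem.Int.band (c >>> j.toNat) 1 ≠ 0 then '#' else ' '))])
    []

-- ===== PRECONDITION & SPEC =====
-- Pre_ excludes exactly the inputs where Python A raises IndexError: arr1[i] or arr2[i]
-- for some 0 ≤ i < n out of range.
def Pre_solution (n : Int) (arr1 : List Int) (arr2 : List Int) : Prop :=
  n ≤ PySem.List.len arr1 ∧ n ≤ PySem.List.len arr2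
instance (n : Int) (arr1 : List Int) (arr2 : List Int) : Decidable (Pre_solution n arr1 arr2) := by unfold Pre_solution; infer_instance

def pvWitness_solution : Int × List Int × List Int := (2, [1, 2], [2, 3])

def Spec_solution (n : Int) (arr1 : List Int) (arr2 : List Int) (out : List String) : Prop := out = solution_alt n arr1 arr2
instance (n : Int) (arr1 : List Int) (arr2 : List Int) (out : List String) : Decidable (Spec_solution n arr1 arr2 out) := by unfold Spec_solution; infer_instance

-- ===== CLAIM (what is proved, stated in full; the proofs are below) =====
def Claim_equal_solution : Prop := ∀ (n : Int) (arr1 : List Int) (arr2 : List Int), Dom_solution n arr1 arr2 → Pre_solution n arr1 arr2 → Spec_solution n arr1 arr2 (solution n arr1 arr2)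

-- ===== LEMMAS AND PROOFS =====

-- the character both programs emit for bit k (two's complement) of x
def pvBitChar (x : Int) (k : Nat) : Char :=
  if PySem.Int.mod (x >>> k) 2 ≠ 0 then '#' else ' '

-- Python's (x >> k) % 2 is the k-th two's-complement bit
theorem pvMod_shift_eq_testBit (x : Int) (k : Nat) :
    PySem.Int.mod (x >>> k) 2 = if x.testBit k then 1 else 0 := by
  rw [PySem.Int.mod_eq_emod_of_pos (by omega : (0:Int) < 2)]
  cases x with
  | ofNat m =>
      have hbit : (Int.ofNat m).testBit k = decide (m >>> k % 2 = 1) := by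
        simp [Int.testBit, Nat.testBit_eq_decide_div_mod_eq, Nat.shiftRight_eq_div_pow]
      rw [hbit, Int.ofNat_eq_natCast, ← Int.natCast_shiftRight]
      obtain ⟨t, ht⟩ : ∃ t, m >>> k = t := ⟨_, rfl⟩
      rw [ht]
      rcases Nat.mod_two_eq_zero_or_one t with h | h <;> simp [h] <;> omega
  | negSucc m =>
      have hbit : (Int.negSucc m).testBit k = !decide (m >>> k % 2 = 1) := by
        simp [Int.testBit, Nat.testBit_eq_decide_div_mod_eq, Nat.shiftRight_eq_div_pow]
      rw [hbit, Int.negSucc_shiftRight, Int.negSucc_eq]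
      obtain ⟨t, ht⟩ : ∃ t, m >>> k = t := ⟨_, rfl⟩
      rw [ht]
      rcases Nat.mod_two_eq_zero_or_one t with h | h <;> simp [h] <;> omega

theorem pvBitChar_eq (x : Int) (k : Nat) :
    pvBitChar x k = if x.testBit k then '#' else ' ' := by
  unfold pvBitChar
  rw [pvMod_shift_eq_testBit]
  by_cases h : x.testBit k <;> simp [h]

theorem pvLdiff00 : Nat.ldiff 0 0 = 0 := by
  apply Nat.eq_of_testBit_eq; intro i; simp [Nat.testBit_ldiff]
theorem pvLdiff01 : Nat.ldiff 0 1 = 0 := by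
  apply Nat.eq_of_testBit_eq; intro i; simp [Nat.testBit_ldiff]
theorem pvLdiff10 : Nat.ldiff 1 0 = 1 := by
  apply Nat.eq_of_testBit_eq; intro i; simp [Nat.testBit_ldiff]
theorem pvLdiff11 : Nat.ldiff 1 1 = 0 := by
  apply Nat.eq_of_testBit_eq; intro i; simp [Nat.testBit_ldiff]

-- masking a submask off: n - (n & m) is the bitwise difference
theorem pvSubAnd (n m : Nat) : n - (n &&& m) = Nat.ldiff n m := by
  induction n using Nat.div2Induction generalizing m with
  | _ n ih =>
    rcases Nat.eq_zero_or_pos n with h0 | h0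
    · subst h0
      apply Nat.eq_of_testBit_eq
      intro i; simp [Nat.testBit_ldiff]
    · have ihh := ih h0 (m / 2)
      have hdiv : Nat.ldiff n m / 2 = Nat.ldiff (n / 2) (m / 2) := by
        have := @Nat.bitwise_div_two_pow (fun p q => p && !q) n m 1 (by simp)
        simpa [Nat.ldiff] using this
      have handdiv : (n &&& m) / 2 = n / 2 &&& m / 2 := Nat.and_div_two
      have hmod2 : Nat.ldiff n m % 2 = Nat.ldiff (n % 2) (m % 2) := by
        have := @Nat.bitwise_mod_two_pow (fun p q => p && !q) n m 1 (by simp)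
        simpa [Nat.ldiff] using this
      have handmod2 : (n &&& m) % 2 = (n % 2) &&& (m % 2) := by
        have := @Nat.and_mod_two_pow n m 1
        simpa using this
      have hle : n / 2 &&& m / 2 ≤ n / 2 := Nat.and_le_left
      rcases Nat.mod_two_eq_zero_or_one n with h | h <;>
        rcases Nat.mod_two_eq_zero_or_one m with h' | h' <;>
          rw [h, h'] at hmod2 handmod2 <;>
          simp only [pvLdiff00, pvLdiff01, pvLdiff10, pvLdiff11,
            show 0 &&& 0 = 0 by decide, show 0 &&& 1 = 0 by decide,
            show 1 &&& 0 = 0 by decide, show (1 : Nat) &&& 1 = 1 by decide] at hmod2 handmod2 <;>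
          omega

-- PySem's Python-exact bitwise or agrees with Mathlib's Int.lor
theorem pvBor_eq_lor (a b : Int) : PySem.Int.bor a b = Int.lor a b := by
  cases a with
  | ofNat m =>
    cases b with
    | ofNat n =>
      simp [PySem.Int.bor, Int.lor, Int.ofNat_eq_natCast]
    | negSucc n =>
      have h1 : ¬ (0 : Int) ≤ Int.negSucc n := by simp [Int.negSucc_eq]; omega
      simp only [PySem.Int.bor, Int.lor, h1, if_false, Int.ofNat_eq_natCast,
        Int.natCast_nonneg, if_true]
      rw [show (-(Int.negSucc n) - 1).toNat = n by rw [Int.negSucc_eq]; omega]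
      rw [show ((↑m : Int)).toNat = m from Int.toNat_natCast m]
      rw [pvSubAnd n m, Int.negSucc_eq]
      ring
  | negSucc m =>
    cases b with
    | ofNat n =>
      have h1 : ¬ (0 : Int) ≤ Int.negSucc m := by simp [Int.negSucc_eq]; omega
      simp only [PySem.Int.bor, Int.lor, h1, if_false, Int.ofNat_eq_natCast,
        Int.natCast_nonneg, if_true]
      rw [show (-(Int.negSucc m) - 1).toNat = m by rw [Int.negSucc_eq]; omega]
      rw [show ((↑n : Int)).toNat = n from Int.toNat_natCast n]
      rw [pvSubAnd m n, Int.negSucc_eq]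
      ring
    | negSucc n =>
      have h1 : ¬ (0 : Int) ≤ Int.negSucc m := by simp [Int.negSucc_eq]; omega
      have h2 : ¬ (0 : Int) ≤ Int.negSucc n := by simp [Int.negSucc_eq]; omega
      simp only [PySem.Int.bor, Int.lor, h1, h2, if_false]
      rw [show (-(Int.negSucc m) - 1).toNat = m by rw [Int.negSucc_eq]; omega]
      rw [show (-(Int.negSucc n) - 1).toNat = n by rw [Int.negSucc_eq]; omega]
      rw [Int.negSucc_eq]
      ring_nf

-- per-bit characterisation of the row OR
theorem pvBitChar_bor (a b : Int) (k : Nat) :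
    pvBitChar (PySem.Int.bor a b) k =
      if pvBitChar a k = ' ' ∧ pvBitChar b k = ' ' then ' ' else '#' := by
  rw [pvBitChar_eq, pvBitChar_eq, pvBitChar_eq, pvBor_eq_lor, Int.testBit_lor]
  by_cases ha : a.testBit k <;> by_cases hb : b.testBit k <;> simp [ha, hb]

-- the halving state of A's conversion loop is an arithmetic right shift
theorem pvFloordiv_shift (x : Int) (k : Nat) :
    (PySem.Int.floordiv x 2) >>> k = x >>> (k + 1) := by
  have h2 : PySem.Int.floordiv x 2 = x >>> (1 : Nat) := by
    rw [PySem.Int.floordiv_eq_ediv_of_pos (by omega : (0:Int) < 2)]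
    rw [Int.shiftRight_eq_div_pow]
    norm_num
  rw [h2, ← Int.shiftRight_add, Nat.add_comm]

-- A's conversion loop, before the final reversal: LSB-first bit characters
theorem pvConvLoop (l : List Int) : ∀ (x : Int) (cs : List Char),
    l.foldl
      (fun (st : Int × List Char) _ =>
        let remains := PySem.Int.mod st.1 2
        let temp := PySem.Int.floordiv st.1 2
        (temp, st.2 ++ [if remains ≠ 0 then '#' else ' ']))
      (x, cs)
    = (x >>> l.length, cs ++ (List.range l.length).map (pvBitChar x)) := by
  induction l with
  | nil => intro x cs; simp
  | cons a l ih =>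
      intro x cs
      simp only [List.foldl_cons, List.length_cons, ih]
      have hchar : pvBitChar (PySem.Int.floordiv x 2) = fun k => pvBitChar x (k + 1) := by
        funext k
        unfold pvBitChar
        rw [pvFloordiv_shift]
      have h0 : (if PySem.Int.mod x 2 ≠ 0 then '#' else ' ') = pvBitChar x 0 := by
        simp [pvBitChar, Int.shiftRight_zero]
      rw [hchar, h0, List.range_succ_eq_map, List.map_cons, List.map_map, pvFloordiv_shift]
      simp [Function.comp, List.append_assoc]

theorem pvConvertToBinary_eq (n : Int) (num : Int) :
    pvConvertToBinary n num = ((List.range n.toNat).map (pvBitChar num)).reverse := by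
  unfold pvConvertToBinary
  rw [pvConvLoop]
  rw [PySem.List.length_pyRange_one]
  norm_num

-- indexing the reversed LSB-first character list reads bit N-1-k
theorem pvRevGetD (x : Int) (N k : Nat) (hk : k < N) :
    ((List.range N).map (pvBitChar x)).reverse.getD k ' ' = pvBitChar x (N - 1 - k) := by
  rw [List.getD_eq_getElem _ ' ' (by simpa using hk), List.getElem_reverse]
  simp

-- one row: A's merge of the two conversions equals B's MSB-first rendering of the OR
theorem pvRow_eq (n a b : Int) :
    (PySem.List.pyRange 0 n 1).foldl
      (fun (r : List Char) j =>
        r ++ [if PySem.List.pyGetD (pvConvertToBinary n a) j ' ' = ' ' ∧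
               PySem.List.pyGetD (pvConvertToBinary n b) j ' ' = ' ' then ' ' else '#']) []
    = (PySem.List.pyRange (n - 1) (-1) (-1)).map
        (fun j => if PySem.Int.band ((PySem.Int.bor a b) >>> j.toNat) 1 ≠ 0 then '#' else ' ') := by
  rw [PySem.List.foldl_append_singleton_eq_map, List.nil_append]
  rw [PySem.List.pyRange_one, PySem.List.pyRange_neg_one]
  have e1 : (n - 0).toNat = n.toNat := by omega
  have e2 : ((n - 1) - (-1)).toNat = n.toNat := by omega
  rw [e1, e2, List.map_map, List.map_map]
  apply List.map_congr_left
  intro k hk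
  rw [List.mem_range] at hk
  simp only [Function.comp]
  rw [pvConvertToBinary_eq, pvConvertToBinary_eq]
  have ht : ((n - 1) - (k:Int)).toNat = n.toNat - 1 - k := by omega
  simp only [zero_add, PySem.List.pyGetD_natCast, pvRevGetD a n.toNat k hk,
    pvRevGetD b n.toNat k hk, ht, PySem.Int.band_one, Int.shiftRight_natCast_right]
  rw [show (if PySem.Int.mod ((PySem.Int.bor a b) >>> (n.toNat - 1 - k)) 2 ≠ 0 then '#' else ' ')
        = pvBitChar (PySem.Int.bor a b) (n.toNat - 1 - k) from rfl]
  rw [pvBitChar_bor]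

theorem solution_eq_alt (n : Int) (arr1 arr2 : List Int) :
    solution n arr1 arr2 = solution_alt n arr1 arr2 := by
  unfold solution solution_alt
  rw [PySem.List.foldl_append_singleton_eq_map, PySem.List.foldl_append_singleton_eq_map,
    List.nil_append, List.nil_append]
  apply List.map_congr_left
  intro i _
  exact congrArg String.ofList (pvRow_eq n (PySem.List.pyGetD arr1 i 0) (PySem.List.pyGetD arr2 i 0))

-- ===== VERDICT (by name: the statement is the Claim_ definition above) =====
theorem solution_spec : Claim_equal_solution := by
  intro n arr1 arr2 _ _
  unfold Spec_solution
  exact solution_eq_alt n arr1 arr2
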